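-- pv_equiv track=rewrite | github.com/JongseoKang/Compiler | assignment1/lexer.py | is_adjacent_character_transposition
-- ===== SOURCE A (Python) =====
-- reserved = {
--     "namespace": "NAMESPACE",
--     "const": "CONST",
--     "var": "VAR",
--     "func": "FUNC",
--     "begin": "BEGIN",
--     "end": "END",
--     "skip": "SKIP",
--     "read": "READ",
--     "print": "PRINT",
--     "call": "CALL",
--     "if": "IF",
--     "then": "THEN",
--     "else": "ELSE",
--     "while": "WHILE",
--     "do": "DO",
--     "return": "RETURN"
-- }
--
-- def is_adjacent_character_transposition(lexeme):
--     for keyword in list(reserved.keys()):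
--         if len(lexeme) != len(keyword):
--             continue
--         if any(lexeme[:i] + lexeme[i + 1] + lexeme[i] + lexeme[i + 2:] \
--             == keyword for i in range(len(lexeme) - 1)):
--             return keyword
--
--     return None
-- ===== SOURCE B (Python) =====
-- reserved = {
--     "namespace": "NAMESPACE",
--     "const": "CONST",
--     "var": "VAR",
--     "func": "FUNC",
--     "begin": "BEGIN",
--     "end": "END",
--     "skip": "SKIP",
--     "read": "READ",
--     "print": "PRINT",
--     "call": "CALL",
--     "if": "IF",
--     "then": "THEN",
--     "else": "ELSE",
--     "while": "WHILE",
--     "do": "DO",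
--     "return": "RETURN"
-- }
--
-- # Precomputed index: every single-adjacent-transposition variant of a keyword
-- # -> that keyword, first keyword (in reserved order) winning on collisions.
-- _table = {}
-- for _kw in reserved:
--     for _i in range(len(_kw) - 1):
--         _v = _kw[:_i] + _kw[_i + 1] + _kw[_i] + _kw[_i + 2:]
--         if _v not in _table:
--             _table[_v] = _kw
--
-- def is_adjacent_character_transposition(lexeme):
--     return _table.get(lexeme)
-- ===== Notes on version B (the rewrite author's own statement) =====
-- stated objective: alternative
-- what changed: Instead of scanning all 16 keywords and generating every adjacent swap of the lexeme on each call, B precomputes once at module load a first-wins dict mapping each adjacent-transposition variant of a keyword to its keyword, so each call is a single dict lookup.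
import Mathlib
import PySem

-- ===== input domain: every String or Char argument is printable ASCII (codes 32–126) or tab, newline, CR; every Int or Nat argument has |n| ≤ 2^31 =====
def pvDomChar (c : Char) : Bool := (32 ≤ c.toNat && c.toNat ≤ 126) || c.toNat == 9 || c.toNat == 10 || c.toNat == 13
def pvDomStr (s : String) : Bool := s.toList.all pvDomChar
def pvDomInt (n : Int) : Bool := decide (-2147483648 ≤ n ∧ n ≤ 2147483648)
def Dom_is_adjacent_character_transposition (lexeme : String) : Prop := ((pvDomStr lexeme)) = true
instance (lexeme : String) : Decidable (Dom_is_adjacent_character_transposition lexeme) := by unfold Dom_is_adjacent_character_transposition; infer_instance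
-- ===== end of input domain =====

-- B replaces A's per-query scan over all keywords and swap positions by a table of all
-- adjacent-transposition variants precomputed once at module load, so a query is one dict lookup.

-- module-level constant: list(reserved.keys()) in insertion order
def reservedKeys : List String :=
  ["namespace", "const", "var", "func", "begin", "end", "skip", "read",
   "print", "call", "if", "then", "else", "while", "do", "return"]

-- ===== PORT A =====
-- lexeme[:i] + lexeme[i+1] + lexeme[i] + lexeme[i+2:] == keyword  (the indexing never
-- raises in A because i ranges over range(len(lexeme)-1); the 'false' branch is unreachable)
def pvCheckSwap (l : List Char) (k : List Char) (i : Int) : Bool :=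
  match PySem.List.pyGet? l (i + 1), PySem.List.pyGet? l i with
  | some c1, some c0 =>
      PySem.List.slice l none (some i) ++ c1 :: c0 :: PySem.List.slice l (some (i + 2)) none == k
  | _, _ => false

-- the 'for keyword in list(reserved.keys())' loop with its continue / return keyword / fall-through
def pvALoop (l : List Char) : List String → Option String
  | [] => none
  | kw :: rest =>
      if (l.length : Int) ≠ PySem.Str.len kw then pvALoop l rest
      else if (PySem.List.pyRange 0 ((l.length : Int) - 1) 1).any (fun i => pvCheckSwap l kw.toList i)
      then some kw
      else pvALoop l rest

def is_adjacent_character_transposition (lexeme : String) : Option String :=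
  pvALoop lexeme.toList reservedKeys

-- ===== PORT B =====
-- _kw[:_i] + _kw[_i+1] + _kw[_i] + _kw[_i+2:]  (indices always in range: _i in range(len-1))
def pvVariant (k : List Char) (i : Int) : List Char :=
  PySem.List.slice k none (some i) ++
    PySem.List.pyGetD k (i + 1) ' ' :: PySem.List.pyGetD k i ' ' ::
    PySem.List.slice k (some (i + 2)) none

-- the module-load loop of Source B: first-wins variant -> keyword table
def pvBTable : PySem.Dict (List Char) String :=
  reservedKeys.foldl
    (fun t kw =>
      (PySem.List.pyRange 0 (PySem.Str.len kw - 1) 1).foldl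
        (fun t i =>
          let v := pvVariant kw.toList i
          if t.contains v then t else t.insert v kw)
        t)
    PySem.Dict.empty

def is_adjacent_character_transposition_alt (lexeme : String) : Option String :=
  PySem.Dict.get? pvBTable lexeme.toList

-- ===== PRECONDITION & SPEC =====
def Spec_is_adjacent_character_transposition (lexeme : String) (out : Option String) : Prop := out = is_adjacent_character_transposition_alt lexeme
instance (lexeme : String) (out : Option String) : Decidable (Spec_is_adjacent_character_transposition lexeme out) := by unfold Spec_is_adjacent_character_transposition; infer_instance

-- ===== CLAIM (what is proved, stated in full; the proofs are below) =====
def Claim_equal_is_adjacent_character_transposition : Prop := ∀ (lexeme : String), Dom_is_adjacent_character_transposition lexeme → Spec_is_adjacent_character_transposition lexeme (is_adjacent_character_transposition lexeme)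

-- ===== LEMMAS AND PROOFS =====

-- the swap of positions n and n+1, on the Nat/List side (proof-only helper)
def swapL (l : List Char) (n : Nat) : List Char :=
  l.take n ++ (match l.drop n with
               | a :: b :: t => b :: a :: t
               | t => t)

-- pvBTable evaluated to its literal value
def pvTableLit : PySem.Dict (List Char) String :=
  PySem.Dict.mk [("anmespace".toList, "namespace"), ("nmaespace".toList, "namespace"), ("naemspace".toList, "namespace"), ("namsepace".toList, "namespace"), ("namepsace".toList, "namespace"), ("namesapce".toList, "namespace"), ("namespcae".toList, "namespace"), ("namespaec".toList, "namespace"), ("ocnst".toList, "const"), ("cnost".toList, "const"), ("cosnt".toList, "const"), ("conts".toList, "const"), ("avr".toList, "var"), ("vra".toList, "var"), ("ufnc".toList, "func"), ("fnuc".toList, "func"), ("fucn".toList, "func"), ("ebgin".toList, "begin"), ("bgein".toList, "begin"), ("beign".toList, "begin"), ("begni".toList, "begin"), ("ned".toList, "end"), ("edn".toList, "end"), ("ksip".toList, "skip"), ("sikp".toList, "skip"), ("skpi".toList, "skip"), ("erad".toList, "read"), ("raed".toList, "read"), ("reda".toList, "read"), ("rpint".toList, "print"), ("pirnt".toList, "print"),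 ("prnit".toList, "print"), ("pritn".toList, "print"), ("acll".toList, "call"), ("clal".toList, "call"), ("call".toList, "call"), ("fi".toList, "if"), ("hten".toList, "then"), ("tehn".toList, "then"), ("thne".toList, "then"), ("lese".toList, "else"), ("esle".toList, "else"), ("eles".toList, "else"), ("hwile".toList, "while"), ("wihle".toList, "while"), ("whlie".toList, "while"), ("whiel".toList, "while"), ("od".toList, "do"), ("erturn".toList, "return"), ("rteurn".toList, "return"), ("reutrn".toList, "return"), ("retrun".toList, "return"), ("retunr".toList, "return")]

set_option maxRecDepth 8192 in
lemma pvBTable_eq : pvBTable = pvTableLit := by decide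

lemma swapL_eq_of_lt {l : List Char} {n : Nat} (h : n + 1 < l.length) :
    swapL l n = l.take n ++ l[n + 1] :: l[n] :: l.drop (n + 2) := by
  have hn : n < l.length := by omega
  have hd1 : l.drop n = l[n] :: l.drop (n + 1) := List.drop_eq_getElem_cons hn
  have hd2 : l.drop (n + 1) = l[n + 1] :: l.drop (n + 2) := List.drop_eq_getElem_cons h
  unfold swapL
  rw [hd1, hd2]

lemma swapL_swapL {l : List Char} {n : Nat} (h : n + 1 < l.length) :
    swapL (swapL l n) n = l := by
  have hn : n < l.length := by omega
  have hd1 : l.drop n = l[n] :: l.drop (n + 1) := List.drop_eq_getElem_cons hn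
  have hd2 : l.drop (n + 1) = l[n + 1] :: l.drop (n + 2) := List.drop_eq_getElem_cons h
  have htl : (l.take n).length = n := by simp [List.length_take]; omega
  rw [swapL_eq_of_lt h]
  unfold swapL
  rw [List.take_left' htl, List.drop_left' htl]
  show List.take n l ++ l[n] :: l[n + 1] :: List.drop (n + 2) l = l
  rw [← hd2, ← hd1, List.take_append_drop]

lemma pvCheckSwap_iff {l k : List Char} {i : Int} (h0 : 0 ≤ i) (h1 : i.toNat + 1 < l.length) :
    pvCheckSwap l k i = true ↔ swapL l i.toNat = k := by
  have hi1 : (i + 1).toNat = i.toNat + 1 := by omega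
  have hi2 : (i + 2).toNat = i.toNat + 2 := by omega
  have hlt : (i : Int) < l.length := by omega
  have hlt1 : (i + 1 : Int) < l.length := by omega
  have hg0 : PySem.List.pyGet? l i = some l[i.toNat] :=
    PySem.List.pyGet?_eq_some_getElem l h0 hlt
  have hg1 : PySem.List.pyGet? l (i + 1) = some l[(i + 1).toNat] :=
    PySem.List.pyGet?_eq_some_getElem l (by omega) hlt1
  simp only [hi1] at hg1
  unfold pvCheckSwap
  rw [hg1, hg0]
  rw [PySem.List.slice_to l h0, PySem.List.slice_from l (by omega : (0:Int) ≤ i + 2), hi2]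
  rw [swapL_eq_of_lt h1]
  exact beq_iff_eq

lemma pvALoop_some {l : List Char} {ks : List String} {kw : String}
    (h : pvALoop l ks = some kw) :
    kw ∈ ks ∧ l.length = kw.toList.length ∧
      ∃ i : Int, 0 ≤ i ∧ i < (l.length : Int) - 1 ∧ pvCheckSwap l kw.toList i = true := by
  induction ks with
  | nil => simp [pvALoop] at h
  | cons kw' rest ih =>
    unfold pvALoop at h
    split_ifs at h with hlen hany
    · obtain ⟨hm, hl, hi⟩ := ih h
      exact ⟨List.mem_cons_of_mem _ hm, hl, hi⟩
    · obtain rfl : kw' = kw := by injection h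
      refine ⟨List.mem_cons_self, ?_, ?_⟩
      · have := hlen
        rw [PySem.Str.len_eq] at this
        omega
      · obtain ⟨i, hmem, hchk⟩ := List.any_eq_true.mp hany
        obtain ⟨h0, hi⟩ := PySem.List.mem_pyRange_one.mp hmem
        exact ⟨i, h0, hi, hchk⟩
    · obtain ⟨hm, hl, hi⟩ := ih h
      exact ⟨List.mem_cons_of_mem _ hm, hl, hi⟩

set_option maxRecDepth 8192 in
set_option maxHeartbeats 1000000 in
lemma pvVariants_in_keys :
    ∀ kw ∈ reservedKeys, ∀ n ∈ List.range (kw.toList.length - 1),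
      pvTableLit.contains (swapL kw.toList n) = true := by decide

set_option maxRecDepth 8192 in
set_option maxHeartbeats 1000000 in
lemma pvKeys_agree :
    ∀ l ∈ PySem.Dict.keys pvTableLit, pvALoop l reservedKeys = PySem.Dict.get? pvTableLit l := by
  decide

-- ===== VERDICT (by name: the statement is the Claim_ definition above) =====
theorem is_adjacent_character_transposition_spec : Claim_equal_is_adjacent_character_transposition := by
  intro lexeme _
  unfold Spec_is_adjacent_character_transposition
  unfold is_adjacent_character_transposition is_adjacent_character_transposition_alt
  rw [pvBTable_eq]
  by_cases hc : pvTableLit.contains lexeme.toList = true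
  · exact pvKeys_agree lexeme.toList ((PySem.Dict.contains_iff_mem_keys _ _).mp hc)
  · have hb : PySem.Dict.get? pvTableLit lexeme.toList = none := by
      have hiso := PySem.Dict.contains_eq_isSome_get? pvTableLit lexeme.toList
      cases hg : PySem.Dict.get? pvTableLit lexeme.toList with
      | none => rfl
      | some v => rw [hg] at hiso; simp at hiso; exact absurd hiso hc
    rw [hb]
    cases ha : pvALoop lexeme.toList reservedKeys with
    | none => rfl
    | some kw =>
      obtain ⟨hkmem, hlen, i, h0, hi, hchk⟩ := pvALoop_some ha
      have h1 : i.toNat + 1 < lexeme.toList.length := by omega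
      have hswap : swapL lexeme.toList i.toNat = kw.toList := (pvCheckSwap_iff h0 h1).mp hchk
      have hl : lexeme.toList = swapL kw.toList i.toNat := by
        rw [← hswap, swapL_swapL h1]
      have hvar : pvTableLit.contains (swapL kw.toList i.toNat) = true :=
        pvVariants_in_keys kw hkmem i.toNat (List.mem_range.mpr (by omega))
      rw [← hl] at hvar
      exact absurd hvar hc
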